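-- pv_equiv track=rewrite | github.com/metagenome-atlas/atlas | atlas/utils.py | index_of_list_items
-- ===== SOURCE A (Python) =====
-- from collections import Counter, OrderedDict
--
-- def index_of_list_items(lists):
--     """Find the highest index for items among list of lists and return ordered dictionary sorted by
--     decreasing index value.
--
--     Args:
--         lists (list): list of lists
--
--     Returns:
--         OrderedDict of list items, sorted by depth with deepest list item first
--
--     Example:
--         >>> lineages = [['1', '131567', '99999999', '2'],
--                         ['1', '131567', '99999999', '2', '1224', '1236', '72274', '135621', '286'],
--                         ['1', '131567', '99999999', '2', '1224'],
--                         ['1', '131567', '99999999', '2', '1224', '1236']]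
--         >>> index_of_list_items(lineages)
--         OrderedDict([('286', 8),
--                      ('135621', 7),
--                      ('72274', 6),
--                      ('1236', 5),
--                      ('1224', 4),
--                      ('2', 3),
--                      ('99999999', 2),
--                      ('131567', 1),
--                      ('1', 0)])
--
--     """
--     indexes = {}
--     for l in lists:
--         for i, item in enumerate(l):
--             if item in indexes:
--                 if indexes[item] < i:
--                     indexes[item] = i
--             else:
--                 indexes[item] = i
--     return OrderedDict(sorted(indexes.items(), key=lambda t: t[1], reverse=True))
-- ===== SOURCE B (Python) =====
-- from collections import OrderedDict
--
--
-- def index_of_list_items(lists):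
--     # Bucket (counting) sort by max index instead of a comparison sort.
--     indexes = {}
--     for l in lists:
--         for i, item in enumerate(l):
--             if indexes.get(item, -1) < i:
--                 indexes[item] = i
--     pairs = []
--     if indexes:
--         m = max(indexes.values())
--         buckets = {}
--         for item, idx in indexes.items():
--             buckets.setdefault(idx, []).append(item)
--         for idx in range(m, -1, -1):
--             for item in buckets.get(idx, []):
--                 pairs.append((item, idx))
--     return OrderedDict(pairs)
-- ===== Notes on version B (the rewrite author's own statement) =====
-- stated objective: alternative
-- what changed: The comparison sort of the max-index dict items is replaced by a counting/bucket sort: items are grouped into buckets by their max index and emitted from the highest bucket down, preserving dict-insertion order on ties.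
import Mathlib
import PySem

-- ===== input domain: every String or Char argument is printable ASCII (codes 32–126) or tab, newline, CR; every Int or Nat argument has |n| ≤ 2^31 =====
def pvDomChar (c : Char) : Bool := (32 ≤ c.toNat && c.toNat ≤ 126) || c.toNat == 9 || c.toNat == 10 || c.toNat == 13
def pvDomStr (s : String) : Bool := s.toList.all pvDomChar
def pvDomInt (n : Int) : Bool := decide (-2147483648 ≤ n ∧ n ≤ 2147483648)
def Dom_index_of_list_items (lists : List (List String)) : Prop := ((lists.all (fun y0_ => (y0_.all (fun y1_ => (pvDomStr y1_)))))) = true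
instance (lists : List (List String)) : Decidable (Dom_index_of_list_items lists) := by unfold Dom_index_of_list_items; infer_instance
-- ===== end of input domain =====

-- B replaces A's comparison sort of the max-index dict by a counting/bucket pass over the index values (alternative algorithm, same results).


-- ===== PORT A =====
def index_of_list_items (lists : List (List String)) : List (String × Int) :=
  let indexes : PySem.Dict String Int :=
    lists.foldl (fun indexes l =>
      (PySem.List.enumerate l).foldl (fun indexes p =>
        if indexes.contains p.2 then
          (if indexes.getD p.2 0 < p.1 then indexes.insert p.2 p.1 else indexes)
        else indexes.insert p.2 p.1) indexes) PySem.Dict.empty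
  (PySem.Dict.ofList (PySem.List.sorted indexes.items (fun t => t.2) true)).items

-- ===== PORT B =====
def index_of_list_items_alt (lists : List (List String)) : List (String × Int) :=
  let indexes : PySem.Dict String Int :=
    lists.foldl (fun indexes l =>
      (PySem.List.enumerate l).foldl (fun indexes p =>
        if indexes.getD p.2 (-1) < p.1 then indexes.insert p.2 p.1 else indexes) indexes) PySem.Dict.empty
  let pairs : List (String × Int) :=
    match PySem.List.max? indexes.values (fun v => v) with
    | none => []
    | some m =>
      let buckets : PySem.Dict Int (List String) :=
        indexes.items.foldl (fun b p => b.modify p.2 [] (fun xs => xs ++ [p.1])) PySem.Dict.empty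
      (PySem.List.pyRange m (-1) (-1)).foldl (fun pairs i =>
        (buckets.getD i []).foldl (fun pairs item => pairs ++ [(item, i)]) pairs) []
  (PySem.Dict.ofList pairs).items

-- ===== PRECONDITION & SPEC =====
def Spec_index_of_list_items (lists : List (List String)) (out : List (String × Int)) : Prop := out = index_of_list_items_alt lists
instance (lists : List (List String)) (out : List (String × Int)) : Decidable (Spec_index_of_list_items lists out) := by unfold Spec_index_of_list_items; infer_instance

-- ===== CLAIM (what is proved, stated in full; the proofs are below) =====
def Claim_equal_index_of_list_items : Prop := ∀ (lists : List (List String)), Dom_index_of_list_items lists → Spec_index_of_list_items lists (index_of_list_items lists)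

-- ===== LEMMAS AND PROOFS =====

def pvStepA (d : PySem.Dict String Int) (p : Int × String) : PySem.Dict String Int :=
  if d.contains p.2 then
    (if d.getD p.2 0 < p.1 then d.insert p.2 p.1 else d)
  else d.insert p.2 p.1

def pvStepB (d : PySem.Dict String Int) (p : Int × String) : PySem.Dict String Int :=
  if d.getD p.2 (-1) < p.1 then d.insert p.2 p.1 else d

lemma pvStep_eq (d : PySem.Dict String Int) (p : Int × String) (hp : 0 ≤ p.1) :
    pvStepA d p = pvStepB d p := by
  unfold pvStepA pvStepB
  by_cases hc : d.contains p.2 = true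
  · have hs : (d.get? p.2).isSome := by rw [← PySem.Dict.contains_eq_isSome_get?, hc]
    rcases Option.isSome_iff_exists.1 hs with ⟨v, hv⟩
    rw [if_pos hc, PySem.Dict.getD_of_get?_eq_some d 0 hv,
      PySem.Dict.getD_of_get?_eq_some d (-1) hv]
  · have hc' : d.contains p.2 = false := by simpa using hc
    rw [if_neg hc, PySem.Dict.getD_of_not_contains d (-1) hc', if_pos (by omega)]

lemma pvDict_eq (lists : List (List String)) :
    lists.foldl (fun d l => (PySem.List.enumerate l).foldl pvStepA d) PySem.Dict.empty
      = lists.foldl (fun d l => (PySem.List.enumerate l).foldl pvStepB d) PySem.Dict.empty := by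
  apply PySem.List.foldl_congr_mem
  intro acc l _
  apply PySem.List.foldl_congr_mem
  intro acc' p hp
  rcases (PySem.List.mem_enumerate_iff l 0 p).1 hp with ⟨k, hk, rfl⟩
  exact pvStep_eq _ _ (by simp)

lemma pvFoldB_nonneg (e : List (Int × String)) (d : PySem.Dict String Int)
    (hd : ∀ p ∈ d.items, 0 ≤ p.2) (he : ∀ q ∈ e, 0 ≤ q.1) :
    ∀ p ∈ (e.foldl pvStepB d).items, 0 ≤ p.2 := by
  induction e generalizing d with
  | nil => simpa using hd
  | cons q e ihe =>
    rw [List.foldl_cons]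
    refine ihe _ ?_ (fun r hr => he r (List.mem_cons_of_mem _ hr))
    intro p hp
    unfold pvStepB at hp
    split at hp
    · rcases (PySem.Dict.mem_items_insert d q.2 q.1 p).1 hp with h | ⟨h, _⟩
      · rw [h]; exact he q (List.mem_cons_self ..)
      · exact hd p h
    · exact hd p hp

lemma pvVals_nonneg (lists : List (List String)) :
    ∀ p ∈ (lists.foldl (fun d l => (PySem.List.enumerate l).foldl pvStepB d) PySem.Dict.empty).items,
      0 ≤ p.2 := by
  induction lists using List.reverseRecOn with
  | nil => simp [PySem.Dict.empty]
  | append_singleton ls l ih =>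
    rw [List.foldl_append, List.foldl_cons, List.foldl_nil]
    refine pvFoldB_nonneg _ _ ih ?_
    intro q hq
    rcases (PySem.List.mem_enumerate_iff l 0 q).1 hq with ⟨k, hk, rfl⟩
    simp



lemma pvInsertBy_append {α : Type} (before : α → α → Bool) (x : α) (l1 l2 : List α)
    (h : ∀ y ∈ l1, before x y = false) :
    PySem.List.insertBy before x (l1 ++ l2) = l1 ++ PySem.List.insertBy before x l2 := by
  induction l1 with
  | nil => simp
  | cons y l1 ih =>
    have hy : before x y = false := h y (List.mem_cons_self ..)
    have h1 : PySem.List.insertBy before x (y :: (l1 ++ l2)) = y :: PySem.List.insertBy before x (l1 ++ l2) := by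
      simp [PySem.List.insertBy, hy]
    rw [List.cons_append, h1, ih (fun y hy => h y (List.mem_cons_of_mem _ hy))]
    simp

lemma pvInsertBy_cons {α : Type} (before : α → α → Bool) (x : α) (L : List α)
    (h : ∀ y ∈ L, before x y = true) :
    PySem.List.insertBy before x L = x :: L := by
  cases L with
  | nil => simp [PySem.List.insertBy]
  | cons y ys => simp [PySem.List.insertBy, h y (List.mem_cons_self ..)]

lemma pvInsertBy_flatMap (x : String × Int) (vs : List Int) (xs : List (String × Int))
    (hvs : vs.Pairwise (· > ·)) (hx : x.2 ∈ vs) :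
    PySem.List.insertBy (fun a b => decide ((fun t : String × Int => t.2) b < (fun t : String × Int => t.2) a)) x
        (vs.flatMap (fun v => xs.filter (fun p => p.2 == v)))
      = vs.flatMap (fun v => (xs ++ [x]).filter (fun p => p.2 == v)) := by
  induction vs with
  | nil => exact absurd hx (by simp)
  | cons v vs ih =>
    have hgt : ∀ w ∈ vs, v > w := (List.pairwise_cons.1 hvs).1
    simp only [List.flatMap_cons]
    by_cases hxv : x.2 = v
    · rw [pvInsertBy_append _ _ _ _ (by
        intro y hy
        have : y.2 = v := by simpa using (List.mem_filter.1 hy).2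
        simp [this, hxv])]
      rw [pvInsertBy_cons _ _ _ (by
        intro y hy
        rcases List.mem_flatMap.1 hy with ⟨w, hw, hyw⟩
        have : y.2 = w := by simpa using (List.mem_filter.1 hyw).2
        simp only [decide_eq_true_eq, this, hxv]
        exact hgt w hw)]
      have h1 : (xs ++ [x]).filter (fun p => p.2 == v) = xs.filter (fun p => p.2 == v) ++ [x] := by
        rw [List.filter_append]; simp [hxv]
      have h2 : vs.flatMap (fun w => (xs ++ [x]).filter (fun p => p.2 == w))
          = vs.flatMap (fun w => xs.filter (fun p => p.2 == w)) := by
        apply List.flatMap_congr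
        intro w hw
        rw [List.filter_append]
        have : x.2 ≠ w := by have := hgt w hw; omega
        simp [this]
      rw [h1, h2]; simp
    · have hx' : x.2 ∈ vs := by rcases List.mem_cons.1 hx with h | h; exact absurd h hxv; exact h
      rw [pvInsertBy_append _ _ _ _ (by
        intro y hy
        have : y.2 = v := by simpa using (List.mem_filter.1 hy).2
        simp only [decide_eq_false_iff_not, this, not_lt]
        have := hgt _ hx'; omega)]
      rw [ih (List.pairwise_cons.1 hvs).2 hx']
      have h1 : (xs ++ [x]).filter (fun p => p.2 == v) = xs.filter (fun p => p.2 == v) := by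
        rw [List.filter_append]; simp [hxv]
      rw [h1]

lemma pvSorted_rev_eq_flatMap (xs : List (String × Int)) (vs : List Int)
    (hvs : vs.Pairwise (· > ·)) (hmem : ∀ p ∈ xs, p.2 ∈ vs) :
    PySem.List.sorted xs (fun t => t.2) true = vs.flatMap (fun v => xs.filter (fun p => p.2 == v)) := by
  induction xs using List.reverseRecOn with
  | nil => simp [PySem.List.sorted]
  | append_singleton l x ih =>
    rw [PySem.List.sorted_rev_eq_foldl_insertBy, List.foldl_append, List.foldl_cons, List.foldl_nil,
      ← PySem.List.sorted_rev_eq_foldl_insertBy,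
      ih (fun p hp => hmem p (List.mem_append_left _ hp))]
    exact pvInsertBy_flatMap x vs l hvs (hmem x (by simp))

lemma pvRange_pairwise_gt (m : Int) : (PySem.List.pyRange m (-1) (-1)).Pairwise (· > ·) := by
  rw [PySem.List.pyRange_neg_one_eq_reverse, List.pairwise_reverse]
  exact PySem.List.pairwise_lt_pyRange_one _ _

lemma pvBuckets_getD (d : PySem.Dict String Int) (i : Int) :
    (d.items.foldl (fun b p => b.modify p.2 [] (fun xs => xs ++ [p.1])) PySem.Dict.empty).getD i []
      = (d.items.filter (fun p => p.2 == i)).map (fun p => p.1) := by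
  have h := PySem.Dict.getD_foldl_modify_append (d.items.map Prod.swap) PySem.Dict.empty i
  rw [List.foldl_map, List.filter_map, List.map_map] at h
  simpa using h

lemma pvSorted_eq_buckets (d : PySem.Dict String Int) (hnn : ∀ p ∈ d.items, 0 ≤ p.2) :
    PySem.List.sorted d.items (fun t => t.2) true =
      (match PySem.List.max? d.values (fun v => v) with
       | none => []
       | some m =>
         (PySem.List.pyRange m (-1) (-1)).foldl (fun pairs i =>
           (((d.items.foldl (fun b p => b.modify p.2 [] (fun xs => xs ++ [p.1]))
               PySem.Dict.empty)).getD i []).foldl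
             (fun pairs item => pairs ++ [(item, i)]) pairs) []) := by
  rcases hm : PySem.List.max? d.values (fun v => v) with _ | m
  · have hv : d.values = [] := (PySem.List.max?_eq_none_iff _ _).1 hm
    have hi : d.items = [] := by
      have : d.items.map (fun p => p.2) = [] := hv
      exact List.map_eq_nil_iff.1 this
    simp [hi, PySem.List.sorted]
  · have hmem : ∀ p ∈ d.items, p.2 ∈ PySem.List.pyRange m (-1) (-1) := by
      intro p hp
      rw [PySem.List.mem_pyRange_neg_one]
      have h1 : 0 ≤ p.2 := hnn p hp
      have h2 : p.2 ≤ m := by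
        have : p.2 ∈ d.values := by
          show p.2 ∈ d.items.map (fun q => q.2)
          exact List.mem_map_of_mem hp
        exact PySem.List.max?_isMax hm _ this
      omega
    have hstep : ∀ (acc : List (String × Int)) (i : Int),
        ((d.items.foldl (fun b p => b.modify p.2 [] (fun xs => xs ++ [p.1]))
            PySem.Dict.empty).getD i []).foldl (fun pairs item => pairs ++ [(item, i)]) acc
          = acc ++ d.items.filter (fun p => p.2 == i) := by
      intro acc i
      rw [pvBuckets_getD, PySem.List.foldl_append_singleton_eq_map, List.map_map]
      congr 1
      calc (d.items.filter (fun p => p.2 == i)).map ((fun item => (item, i)) ∘ (fun p => p.1))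
          = (d.items.filter (fun p => p.2 == i)).map id := by
            apply List.map_congr_left
            intro p hp
            have : p.2 = i := by simpa using (List.mem_filter.1 hp).2
            simp [Function.comp, ← this]
        _ = d.items.filter (fun p => p.2 == i) := List.map_id _
    show PySem.List.sorted d.items (fun t => t.2) true =
      List.foldl (fun pairs i =>
        List.foldl (fun pairs item => pairs ++ [(item, i)]) pairs
          ((List.foldl (fun b p => b.modify p.2 [] fun xs => xs ++ [p.1]) PySem.Dict.empty d.items).getD i []))
        [] (PySem.List.pyRange m (-1) (-1))
    rw [PySem.List.foldl_congr_mem (PySem.List.pyRange m (-1) (-1)) _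
      (fun acc i => acc ++ d.items.filter (fun p => p.2 == i)) []
      (fun acc i _ => hstep acc i)]
    rw [PySem.List.foldl_append_eq_flatMap, pvSorted_rev_eq_flatMap d.items _ (pvRange_pairwise_gt m) hmem]
    simp

-- ===== VERDICT (by name: the statement is the Claim_ definition above) =====
theorem index_of_list_items_spec : Claim_equal_index_of_list_items := by
  intro lists _
  show index_of_list_items lists = index_of_list_items_alt lists
  show (PySem.Dict.ofList (PySem.List.sorted
      (lists.foldl (fun d l => (PySem.List.enumerate l).foldl pvStepA d) PySem.Dict.empty).items
      (fun t => t.2) true)).items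
    = (PySem.Dict.ofList (
        match PySem.List.max? (lists.foldl (fun d l =>
            (PySem.List.enumerate l).foldl pvStepB d) PySem.Dict.empty).values (fun v => v) with
        | none => []
        | some m => (PySem.List.pyRange m (-1) (-1)).foldl (fun pairs i =>
            (((lists.foldl (fun d l => (PySem.List.enumerate l).foldl pvStepB d)
                PySem.Dict.empty).items.foldl
               (fun b p => b.modify p.2 [] (fun xs => xs ++ [p.1])) PySem.Dict.empty).getD i []).foldl
             (fun pairs item => pairs ++ [(item, i)]) pairs) [])).items
  rw [pvDict_eq lists, pvSorted_eq_buckets _ (pvVals_nonneg lists)]
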